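-- pv_equiv track=rewrite | github.com/sunraku0709/oracle-bet-bot | bot.py | match_team
-- ===== SOURCE A (Python) =====
-- def normalize(name):
--     return name.lower().strip()
--
-- def match_team(target, candidates):
--     t = normalize(target)
--     for c in candidates:
--         if normalize(c) == t:
--             return c
--     for c in candidates:
--         if t in normalize(c) or normalize(c) in t:
--             return c
--     t_words = set(t.split())
--     best, best_score = None, 0
--     for c in candidates:
--         score = len(t_words & set(normalize(c).split()))
--         if score > best_score:
--             best, best_score = c, score
--     return best if best_score > 0 else None
-- ===== SOURCE B (Python) =====
-- def match_team(target, candidates):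
--     t = target.lower().strip()
--     t_words = set(t.split())
--     first_exact = None
--     first_sub = None
--     best, best_score = None, 0
--     for c in candidates:
--         n = c.lower().strip()
--         if first_exact is None and n == t:
--             first_exact = c
--         if first_sub is None and (t in n or n in t):
--             first_sub = c
--         score = len(t_words & set(n.split()))
--         if score > best_score:
--             best, best_score = c, score
--     if first_exact is not None:
--         return first_exact
--     if first_sub is not None:
--         return first_sub
--     return best if best_score > 0 else None
-- ===== Notes on version B (the rewrite author's own statement) =====
-- stated objective: alternative
-- what changed: Replaces A's three priority-ordered scans (each re-normalizing every candidate) with one single pass that normalizes each candidate once and maintains first-exact, first-substring and best-word-overlap slots, resolving the priority after the loop.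
import Mathlib
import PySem

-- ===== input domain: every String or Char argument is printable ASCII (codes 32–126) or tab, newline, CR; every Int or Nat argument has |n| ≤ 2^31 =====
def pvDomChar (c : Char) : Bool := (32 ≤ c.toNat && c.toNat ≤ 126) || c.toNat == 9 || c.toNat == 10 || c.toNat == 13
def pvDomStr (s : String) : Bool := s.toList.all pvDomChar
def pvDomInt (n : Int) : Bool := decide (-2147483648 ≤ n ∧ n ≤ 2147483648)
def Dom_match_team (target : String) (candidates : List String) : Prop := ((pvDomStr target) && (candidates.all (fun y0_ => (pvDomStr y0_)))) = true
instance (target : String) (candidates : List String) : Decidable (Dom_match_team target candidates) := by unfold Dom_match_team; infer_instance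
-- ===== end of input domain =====

-- B folds A's three priority-ordered scans into one pass over the candidates; same results, each candidate pyNormalized once.

-- ===== PORT A =====
def pyNormalize (name : String) : String := PySem.Str.strip (PySem.Str.lower name)

-- first loop of A: first candidate whose normalization equals t
def aLoop1 (t : String) : List String → Option String
  | [] => none
  | c :: cs => if pyNormalize c = t then some c else aLoop1 t cs

-- second loop of A: first candidate related to t by substring containment
def aLoop2 (t : String) : List String → Option String
  | [] => none
  | c :: cs =>
      if PySem.Str.isIn t (pyNormalize c) || PySem.Str.isIn (pyNormalize c) t then some c
      else aLoop2 t cs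

-- third loop of A: best word-overlap score, strict improvement only
def aLoop3 (tw : PySem.Set String) : List String → Option String × Nat → Option String × Nat
  | [], acc => acc
  | c :: cs, (best, bs) =>
      let score := (PySem.Set.inter tw (PySem.Set.ofList (PySem.Str.split₀ (pyNormalize c)))).length
      if bs < score then aLoop3 tw cs (some c, score) else aLoop3 tw cs (best, bs)

def match_team (target : String) (candidates : List String) : Option String :=
  let t := pyNormalize target
  match aLoop1 t candidates with
  | some c => some c
  | none =>
    match aLoop2 t candidates with
    | some c => some c
    | none =>
      let tw := PySem.Set.ofList (PySem.Str.split₀ t)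
      match aLoop3 tw candidates (none, 0) with
      | (best, bs) => if 0 < bs then best else none

-- ===== PORT B =====
-- single pass, maintaining first-exact / first-substring / best-overlap slots
def bScan (t : String) (tw : PySem.Set String) :
    List String → Option String → Option String → Option String → Nat →
    Option String × Option String × Option String × Nat
  | [], e, s, b, bs => (e, s, b, bs)
  | c :: cs, e, s, b, bs =>
      let n := PySem.Str.strip (PySem.Str.lower c)
      let e' := if e = none ∧ n = t then some c else e
      let s' := if s = none ∧ (PySem.Str.isIn t n || PySem.Str.isIn n t) then some c else s
      let score := (PySem.Set.inter tw (PySem.Set.ofList (PySem.Str.split₀ n))).length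
      if bs < score then bScan t tw cs e' s' (some c) score
      else bScan t tw cs e' s' b bs

def match_team_alt (target : String) (candidates : List String) : Option String :=
  let t := PySem.Str.strip (PySem.Str.lower target)
  let tw := PySem.Set.ofList (PySem.Str.split₀ t)
  match bScan t tw candidates none none none 0 with
  | (e, s, b, bs) =>
    match e with
    | some c => some c
    | none =>
      match s with
      | some c => some c
      | none => if 0 < bs then b else none

-- ===== PRECONDITION & SPEC =====
def Spec_match_team (target : String) (candidates : List String) (out : Option String) : Prop := out = match_team_alt target candidates
instance (target : String) (candidates : List String) (out : Option String) : Decidable (Spec_match_team target candidates out) := by unfold Spec_match_team; infer_instance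

-- ===== CLAIM (what is proved, stated in full; the proofs are below) =====
def Claim_equal_match_team : Prop := ∀ (target : String) (candidates : List String), Dom_match_team target candidates → Spec_match_team target candidates (match_team target candidates)

-- ===== LEMMAS AND PROOFS =====

-- a first-occurrence slot, threaded through the loop, equals Option.or with the scan of the tail
theorem slotOr {α : Type} {p : Prop} [Decidable p] (e : Option α) (c : α) (r : Option α) :
    (if e = none ∧ p then some c else e).or r = e.or (if p then some c else r) := by
  cases e with
  | none => by_cases hp : p <;> simp [hp]
  | some v => simp

-- the single pass computes the three scans' results, each seeded by its slot
theorem bScan_eq (t : String) (tw : PySem.Set String) :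
    ∀ (cs : List String) (e s b : Option String) (bs : Nat),
      bScan t tw cs e s b bs =
        (e.or (aLoop1 t cs), s.or (aLoop2 t cs), aLoop3 tw cs (b, bs)) := by
  intro cs
  induction cs with
  | nil => intro e s b bs; simp [bScan, aLoop1, aLoop2, aLoop3]
  | cons c cs ih =>
    intro e s b bs
    simp only [bScan, aLoop1, aLoop2, aLoop3, pyNormalize]
    by_cases hsc : bs < (PySem.Set.inter tw (PySem.Set.ofList (PySem.Str.split₀ (PySem.Str.strip (PySem.Str.lower c))))).length
    · simp only [if_pos hsc, ih, slotOr]; rfl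
    · simp only [if_neg hsc, ih, slotOr]; rfl

-- ===== VERDICT (by name: the statement is the Claim_ definition above) =====
theorem match_team_spec : Claim_equal_match_team := by
  intro target candidates _
  unfold Spec_match_team match_team match_team_alt
  simp only [pyNormalize, bScan_eq, Option.none_or]
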